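-- pv_equiv track=rewrite | github.com/manueldinisjunior/URL-shortening-API | app.py | encode_base62
-- ===== SOURCE A (Python) =====
-- BASE62_ALPHABET = "0123456789abcdefghijklmnopqrstuvwxyzABCDEFGHIJKLMNOPQRSTUVWXYZ"
--
-- def encode_base62(number: int) -> str:
--     if number <= 0:
--         raise ValueError("number must be positive")
--     base = len(BASE62_ALPHABET)
--     encoded = []
--     while number:
--         number, rem = divmod(number, base)
--         encoded.append(BASE62_ALPHABET[rem])
--     return "".join(reversed(encoded))
-- ===== SOURCE B (Python) =====
-- BASE62_ALPHABET = "0123456789abcdefghijklmnopqrstuvwxyzABCDEFGHIJKLMNOPQRSTUVWXYZ"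
--
-- def encode_base62(number: int) -> str:
--     if number <= 0:
--         raise ValueError("number must be positive")
--     base = len(BASE62_ALPHABET)
--     # find the largest power of 62 not exceeding number
--     p = 1
--     while p * base <= number:
--         p *= base
--     # emit digits most-significant first by dividing by descending powers
--     out = []
--     while p > 0:
--         out.append(BASE62_ALPHABET[number // p])
--         number %= p
--         p //= base
--     return "".join(out)
-- ===== Notes on version B (the rewrite author's own statement) =====
-- stated objective: alternative
-- what changed: Instead of collecting least-significant digits with divmod and reversing at the end, B first finds the largest power of 62 not exceeding the number and then emits digits most-significant first by dividing by descending powers.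
import Mathlib
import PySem

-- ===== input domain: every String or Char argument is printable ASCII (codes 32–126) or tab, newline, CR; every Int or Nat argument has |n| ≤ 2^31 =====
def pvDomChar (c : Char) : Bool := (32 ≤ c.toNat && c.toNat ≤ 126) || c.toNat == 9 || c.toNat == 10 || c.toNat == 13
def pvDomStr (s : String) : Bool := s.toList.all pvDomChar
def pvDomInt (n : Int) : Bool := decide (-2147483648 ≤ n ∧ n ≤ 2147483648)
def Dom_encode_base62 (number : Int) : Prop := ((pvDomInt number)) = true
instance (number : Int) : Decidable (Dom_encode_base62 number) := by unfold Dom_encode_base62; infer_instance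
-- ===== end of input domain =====

-- B finds the largest power of 62 ≤ number first and emits digits most-significant first
-- by dividing by descending powers, instead of A's divmod loop plus final reversal.
-- (All loops are ported with a fuel parameter large enough never to run out; fuel only
-- makes the recursion structural, it does not change any computed value.)

def pvAlphabet : List Char := "0123456789abcdefghijklmnopqrstuvwxyzABCDEFGHIJKLMNOPQRSTUVWXYZ".toList

-- ===== PORT A =====
-- A's while loop: appends the least-significant digit first into `encoded`
def encode_base62_loop (fuel : Nat) (number : Int) (encoded : List Char) : List Char :=
  match fuel with
  | 0 => encoded
  | fuel + 1 =>
    if number ≤ 0 then encoded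
    else
      encode_base62_loop fuel (PySem.Int.floordiv number 62)
        (encoded ++ [pvAlphabet.getD (PySem.Int.mod number 62).toNat ' '])

-- A raises ValueError for number ≤ 0 (excluded by Pre_); for number > 0 `while number` is `¬ number ≤ 0`
def encode_base62 (number : Int) : String :=
  String.ofList (encode_base62_loop (number.toNat + 1) number []).reverse

-- ===== PORT B =====
-- B's first loop: grow p by factors of 62 while p * 62 ≤ n
def encode_base62_alt_pow (fuel : Nat) (p n : Int) : Int :=
  match fuel with
  | 0 => p
  | fuel + 1 => if p * 62 ≤ n then encode_base62_alt_pow fuel (p * 62) n else p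

-- B's second loop: emit the digit n // p, keep n % p, shrink p by 62
def encode_base62_alt_emit (fuel : Nat) (n p : Int) : List Char :=
  match fuel with
  | 0 => []
  | fuel + 1 =>
    if p ≤ 0 then []
    else
      pvAlphabet.getD (PySem.Int.floordiv n p).toNat ' ' ::
        encode_base62_alt_emit fuel (PySem.Int.mod n p) (PySem.Int.floordiv p 62)

def encode_base62_alt (number : Int) : String :=
  let p := encode_base62_alt_pow (number.toNat + 1) 1 number
  String.ofList (encode_base62_alt_emit (p.toNat + 1) number p)

-- ===== PRECONDITION & SPEC =====
-- Pre_ excludes number ≤ 0, where A raises ValueError("number must be positive") (B raises too)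
def Pre_encode_base62 (number : Int) : Prop := 0 < number
instance (number : Int) : Decidable (Pre_encode_base62 number) := by unfold Pre_encode_base62; infer_instance
def pvWitness_encode_base62 : Int := 12345

def Spec_encode_base62 (number : Int) (out : String) : Prop := out = encode_base62_alt number
instance (number : Int) (out : String) : Decidable (Spec_encode_base62 number out) := by unfold Spec_encode_base62; infer_instance

-- ===== CLAIM (what is proved, stated in full; the proofs are below) =====
def Claim_equal_encode_base62 : Prop := ∀ (number : Int), Dom_encode_base62 number → Pre_encode_base62 number → Spec_encode_base62 number (encode_base62 number)

-- ===== LEMMAS AND PROOFS =====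

-- canonical base-62 digits of m (most-significant first), over Nat
def pvRep (m : Nat) : List Char :=
  if m = 0 then [] else pvRep (m / 62) ++ [pvAlphabet.getD (m % 62) ' ']
decreasing_by exact Nat.div_lt_self (by omega) (by norm_num)

-- base-62 digits of m padded/peeled MSB-first to exactly k+1 digits
def pvPad : Nat → Nat → List Char
  | 0, m => [pvAlphabet.getD m ' ']
  | k + 1, m => pvAlphabet.getD (m / 62 ^ (k + 1)) ' ' :: pvPad k (m % 62 ^ (k + 1))

theorem pvPad_peel_lsb (k : Nat) : ∀ m : Nat,
    pvPad (k + 1) m = pvPad k (m / 62) ++ [pvAlphabet.getD (m % 62) ' '] := by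
  induction k with
  | zero => intro m; simp [pvPad, pow_one]
  | succ k ih =>
    intro m
    have h1 : m / 62 ^ (k + 1 + 1) = m / 62 / 62 ^ (k + 1) := by
      rw [Nat.div_div_eq_div_mul, pow_succ', mul_comm]
    have h2 : m % 62 ^ (k + 1 + 1) / 62 = m / 62 % 62 ^ (k + 1) := by
      rw [pow_succ']; exact Nat.mod_mul_right_div_self m 62 (62 ^ (k + 1))
    have h3 : m % 62 ^ (k + 1 + 1) % 62 = m % 62 :=
      Nat.mod_mod_of_dvd m (dvd_pow_self 62 (by omega))
    calc pvPad (k + 2) m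
        = pvAlphabet.getD (m / 62 ^ (k + 2)) ' ' :: pvPad (k + 1) (m % 62 ^ (k + 2)) := rfl
      _ = pvAlphabet.getD (m / 62 ^ (k + 2)) ' ' ::
            (pvPad k (m % 62 ^ (k + 2) / 62) ++ [pvAlphabet.getD (m % 62 ^ (k + 2) % 62) ' ']) := by
          rw [ih]
      _ = pvPad (k + 1) (m / 62) ++ [pvAlphabet.getD (m % 62) ' '] := by
          rw [h2, h3, h1]; rfl

theorem pvRep_eq_pvPad (k : Nat) : ∀ m : Nat, 62 ^ k ≤ m → m < 62 ^ (k + 1) →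
    pvRep m = pvPad k m := by
  induction k with
  | zero =>
    intro m h1 h2
    rw [pvRep]
    rw [pow_zero] at h1
    rw [pow_one] at h2
    rw [if_neg (by omega), Nat.div_eq_of_lt h2, Nat.mod_eq_of_lt h2, pvRep, if_pos rfl]
    rfl
  | succ k ih =>
    intro m h1 h2
    have hd1 : 62 ^ k ≤ m / 62 := Nat.le_div_iff_mul_le (by norm_num) |>.mpr (by rw [← pow_succ]; exact h1)
    have hd2 : m / 62 < 62 ^ (k + 1) := Nat.div_lt_iff_lt_mul (by norm_num) |>.mpr (by rw [← pow_succ]; exact h2)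
    have hpos : 0 < 62 ^ (k + 1) := pow_pos (by norm_num) _
    rw [pvRep, if_neg (by omega)]
    rw [ih (m / 62) hd1 hd2, pvPad_peel_lsb]

theorem pvLoopA_rep (f : Nat) : ∀ (n : Int) (acc : List Char), n.toNat < f → 0 ≤ n →
    (encode_base62_loop f n acc).reverse = pvRep n.toNat ++ acc.reverse := by
  induction f with
  | zero => intro n acc hf; omega
  | succ f ih =>
    intro n acc hf hn
    rw [encode_base62_loop]
    split
    · rename_i h
      have h0 : n = 0 := le_antisymm h hn
      subst h0
      rw [pvRep]
      simp
    · rename_i h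
      have hfd : PySem.Int.floordiv n 62 = n / 62 := PySem.Int.floordiv_eq_ediv_of_pos (by norm_num)
      have hmd : PySem.Int.mod n 62 = n % 62 := PySem.Int.mod_eq_emod_of_pos (by norm_num)
      rw [hfd, hmd, ih _ _ (by omega) (by omega)]
      have e1 : (n / 62).toNat = n.toNat / 62 := by omega
      have e2 : (n % 62).toNat = n.toNat % 62 := by omega
      rw [e1, e2]
      conv_rhs => rw [pvRep, if_neg (by omega)]
      simp

theorem pvEmit_pad (k : Nat) : ∀ (f : Nat) (n : Int), k < f → 0 ≤ n → n < 62 ^ (k + 1) →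
    encode_base62_alt_emit f n ((62 : Int) ^ k) = pvPad k n.toNat := by
  induction k with
  | zero =>
    intro f n hf hn hlt
    obtain ⟨f, rfl⟩ : ∃ f', f = f' + 1 := ⟨f - 1, by omega⟩
    rw [pow_zero]
    rw [encode_base62_alt_emit, if_neg (by norm_num),
      PySem.Int.floordiv_eq_ediv_of_pos (b := (1 : Int)) (by norm_num),
      PySem.Int.mod_eq_emod_of_pos (b := (1 : Int)) (by norm_num)]
    rw [Int.ediv_one, Int.emod_one]
    have h162 : PySem.Int.floordiv 1 62 = 0 := by decide
    rw [h162]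
    have hrest : encode_base62_alt_emit f 0 0 = [] := by
      cases f <;> simp [encode_base62_alt_emit]
    rw [hrest]
    rfl
  | succ k ih =>
    intro f n hf hn hlt
    obtain ⟨f, rfl⟩ : ∃ f', f = f' + 1 := ⟨f - 1, by omega⟩
    have hpow : (0 : Int) < 62 ^ (k + 1) := pow_pos (by norm_num) _
    rw [encode_base62_alt_emit, if_neg (by omega),
      PySem.Int.floordiv_eq_ediv_of_pos hpow,
      PySem.Int.mod_eq_emod_of_pos hpow,
      PySem.Int.floordiv_eq_ediv_of_pos (a := (62 : Int) ^ (k + 1)) (by norm_num)]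
    have hdp : (62 : Int) ^ (k + 1) / 62 = 62 ^ k := by
      rw [pow_succ]; exact Int.mul_ediv_cancel _ (by norm_num)
    rw [hdp, ih f (n % 62 ^ (k + 1)) (by omega) (Int.emod_nonneg n (by positivity)) (Int.emod_lt_of_pos n hpow)]
    obtain ⟨m, rfl⟩ := Int.eq_ofNat_of_zero_le hn
    have c1 : ((62 : Int) ^ (k + 1)) = ((62 ^ (k + 1) : Nat) : Int) := by push_cast; ring
    have c2 : ((m : Int) / ((62 ^ (k + 1) : Nat) : Int)).toNat = m / 62 ^ (k + 1) := by
      rw [← Int.natCast_div]; exact Int.toNat_natCast _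
    have c3 : ((m : Int) % ((62 ^ (k + 1) : Nat) : Int)).toNat = m % 62 ^ (k + 1) := by
      rw [← Int.natCast_mod]; exact Int.toNat_natCast _
    rw [c1, c2, c3, Int.toNat_natCast]
    rfl

theorem pvPow_spec (f : Nat) : ∀ (p n : Int), (n - p).toNat < f → 0 < p → p ≤ n →
    ∃ k : Nat, encode_base62_alt_pow f p n = p * 62 ^ k ∧ p * 62 ^ k ≤ n ∧ n < p * 62 ^ (k + 1) := by
  have e : ∀ (q : Int) (j : Nat), q * 62 ^ (j + 1) = q * 62 * 62 ^ j := by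
    intro q j; ring
  induction f with
  | zero => intro p n hf; omega
  | succ f ih =>
    intro p n hf hp hpn
    rw [encode_base62_alt_pow]
    split
    · rename_i h
      obtain ⟨k, h1, h2, h3⟩ := ih (p * 62) n (by omega) (by omega) h
      exact ⟨k + 1, by rw [e]; exact h1, by rw [e]; exact h2, by rw [e]; exact h3⟩
    · rename_i h
      have hlt : n < p * 62 := by omega
      exact ⟨0, by ring, by simpa using hpn, by simpa using hlt⟩

-- ===== VERDICT (by name: the statement is the Claim_ definition above) =====
theorem encode_base62_spec : Claim_equal_encode_base62 := by
  intro n _ hn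
  show encode_base62 n = encode_base62_alt n
  obtain ⟨k, h1, h2, h3⟩ := pvPow_spec (n.toNat + 1) 1 n (by omega) (by norm_num) hn
  rw [one_mul] at h1 h2 h3
  have h2' : ((62 ^ k : Nat) : Int) ≤ n := by exact_mod_cast h2
  have h3' : n < ((62 ^ (k + 1) : Nat) : Int) := by exact_mod_cast h3
  have hk : k < 62 ^ k := Nat.lt_pow_self (by norm_num)
  unfold encode_base62 encode_base62_alt
  simp only [h1]
  have ht : ((62 : Int) ^ k).toNat = 62 ^ k := by
    rw [show ((62 : Int) ^ k) = ((62 ^ k : Nat) : Int) by push_cast; ring, Int.toNat_natCast]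
  rw [ht, pvEmit_pad k _ n (by omega) (by omega) h3,
    pvLoopA_rep _ n [] (by omega) (by omega),
    ← pvRep_eq_pvPad k n.toNat (by omega) (by omega)]
  simp
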